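-- pv_equiv track=rewrite | github.com/tamu-engineering-research/COVID-EMDA | LLM4Grid/SI.6 Forecasting in Power Systems/Text_embedding/Data_Prep_encoder.py | digit_to_letter
-- ===== SOURCE A (Python) =====
-- def digit_to_letter(value):
--     mapping = {i: chr(65 + i) for i in range(26)}
--     is_negative = value < 0
--     value = abs(int(value))  # Convert to integer to discard decimal part, then to positive
--     letter_representation = ''.join(mapping[int(digit)] for digit in str(value) if digit.isdigit())
--
--     if is_negative:
--         letter_representation = 'N' + letter_representation
--
--     return letter_representation
-- ===== SOURCE B (Python) =====
-- def digit_to_letter(value):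
--     is_negative = value < 0
--     n = abs(int(value))
--     if n == 0:
--         letters = 'A'
--     else:
--         letters = ''
--         while n > 0:
--             letters = chr(65 + n % 10) + letters
--             n //= 10
--     return 'N' + letters if is_negative else letters
-- ===== Notes on version B (the rewrite author's own statement) =====
-- stated objective: simpler
-- what changed: Replaces the decimal-string conversion with per-character isdigit filter, int() re-parse and mapping-dict lookup by a direct arithmetic digit-extraction loop (n % 10, n //= 10) prepending chr(65+d).
import Mathlib
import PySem

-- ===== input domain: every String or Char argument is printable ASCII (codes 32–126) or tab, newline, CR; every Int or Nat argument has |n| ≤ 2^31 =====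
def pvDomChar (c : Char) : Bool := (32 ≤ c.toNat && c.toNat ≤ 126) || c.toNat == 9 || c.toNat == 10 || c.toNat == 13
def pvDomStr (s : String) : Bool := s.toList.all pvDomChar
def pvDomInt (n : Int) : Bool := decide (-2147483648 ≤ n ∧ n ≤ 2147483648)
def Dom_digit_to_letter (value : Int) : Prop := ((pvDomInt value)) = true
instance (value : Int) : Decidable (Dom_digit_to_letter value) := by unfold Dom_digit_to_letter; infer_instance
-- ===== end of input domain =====

-- B replaces A's decimal-string traversal (str(), isdigit filter, int() re-parse, 26-entry dict) with an
-- arithmetic digit-extraction loop (n % 10, n //= 10); equivalence proved for all Int inputs.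

-- ===== PORT A =====
-- mapping = {i: chr(65 + i) for i in range(26)}  (values modelled at char granularity; join concatenates them)
def pyMappingA : PySem.Dict Int Char :=
  (PySem.List.pyRange 0 26 1).foldl (fun d i => d.insert i (Char.ofNat (65 + i.toNat))) PySem.Dict.empty

def digit_to_letter (value : Int) : String :=
  let is_negative := value < 0
  let v : Int := |value|  -- abs(int(value)); int() is the identity on an int argument
  -- ''.join(mapping[int(digit)] for digit in str(value) if digit.isdigit())
  -- KeyError / ValueError are unreachable: every kept character is a decimal digit ('.getD' defaults never fire)
  let letters : List Char :=
    ((PySem.Int.toStr v).toList.filter (fun c => PySem.Chars.isdigit c)).map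
      (fun c => (pyMappingA.get? ((PySem.Int.ofChars? [c]).getD 0)).getD '?')
  if is_negative then String.ofList ('N' :: letters) else String.ofList letters

-- ===== PORT B =====
-- while n > 0: letters = chr(65 + n % 10) + letters; n //= 10
def altGo (n : Nat) (acc : List Char) : List Char :=
  if h : n = 0 then acc else altGo (n / 10) (Char.ofNat (65 + n % 10) :: acc)
  termination_by n
  decreasing_by exact Nat.div_lt_self (Nat.pos_of_ne_zero h) (by norm_num)

def digit_to_letter_alt (value : Int) : String :=
  let is_negative := value < 0
  let n : Nat := value.natAbs
  let letters : List Char := if n = 0 then ['A'] else altGo n []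
  if is_negative then String.ofList ('N' :: letters) else String.ofList letters

-- ===== PRECONDITION & SPEC =====
def Spec_digit_to_letter (value : Int) (out : String) : Prop := out = digit_to_letter_alt value
instance (value : Int) (out : String) : Decidable (Spec_digit_to_letter value out) := by unfold Spec_digit_to_letter; infer_instance

-- ===== CLAIM (what is proved, stated in full; the proofs are below) =====
def Claim_equal_digit_to_letter : Prop := ∀ (value : Int), Dom_digit_to_letter value → Spec_digit_to_letter value (digit_to_letter value)

-- ===== LEMMAS AND PROOFS =====

-- big-endian decimal digits of n (digs 0 = [])
def digs (n : Nat) : List Nat :=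
  if h : n = 0 then [] else digs (n / 10) ++ [n % 10]
  termination_by n
  decreasing_by exact Nat.div_lt_self (Nat.pos_of_ne_zero h) (by norm_num)

theorem digs_lt (n : Nat) : ∀ d ∈ digs n, d < 10 := by
  induction n using Nat.strong_induction_on with
  | _ n ih =>
    rw [digs]
    split
    · simp
    · intro d hd
      rcases List.mem_append.mp hd with h | h
      · exact ih (n / 10) (Nat.div_lt_self (Nat.pos_of_ne_zero (by assumption)) (by norm_num)) d h
      · simp at h; omega

theorem toDigitsCore_eq_digs :
    ∀ (fuel n : Nat) (ds : List Char), 0 < n → n < fuel →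
      Nat.toDigitsCore 10 fuel n ds = (digs n).map Nat.digitChar ++ ds := by
  intro fuel
  induction fuel with
  | zero => intro n ds h1 h2; omega
  | succ f ih =>
    intro n ds h1 h2
    rw [Nat.toDigitsCore, digs]
    simp only [dif_neg (Nat.pos_iff_ne_zero.mp h1)]
    by_cases h : n / 10 = 0
    · rw [if_pos h, h, digs]
      simp
    · rw [if_neg h, ih (n / 10) _ (Nat.pos_of_ne_zero h) (by omega)]
      simp

theorem altGo_eq_digs (n : Nat) : ∀ acc, altGo n acc = (digs n).map (fun d => Char.ofNat (65 + d)) ++ acc := by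
  induction n using Nat.strong_induction_on with
  | _ n ih =>
    intro acc
    rw [altGo, digs]
    by_cases h : n = 0
    · simp [h]
    · simp only [dif_neg h]
      rw [ih (n / 10) (Nat.div_lt_self (Nat.pos_of_ne_zero h) (by norm_num))]
      simp

-- A's per-character pipeline on a digit character: kept by isdigit, mapped to its letter
theorem step_keep (d : Nat) (hd : d < 10) : PySem.Chars.isdigit (Nat.digitChar d) = true := by
  interval_cases d <;> decide

theorem step_map (d : Nat) (hd : d < 10) :
    (pyMappingA.get? ((PySem.Int.ofChars? [Nat.digitChar d]).getD 0)).getD '?' = Char.ofNat (65 + d) := by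
  interval_cases d <;> decide

-- A's whole letter pipeline applied to the digit string of a positive n equals B's loop output
theorem pipeline_eq (n : Nat) (hn : 0 < n) :
    ((Nat.toDigits 10 n).filter (fun c => PySem.Chars.isdigit c)).map
      (fun c => (pyMappingA.get? ((PySem.Int.ofChars? [c]).getD 0)).getD '?') = altGo n [] := by
  rw [Nat.toDigits, toDigitsCore_eq_digs (n + 1) n [] hn (by omega), altGo_eq_digs]
  rw [List.append_nil, List.append_nil]
  rw [List.filter_eq_self.mpr]
  · rw [List.map_map]
    apply List.map_congr_left
    intro d hd
    exact step_map d (digs_lt n d hd)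
  · intro c hc
    rcases List.mem_map.mp hc with ⟨d, hd, rfl⟩
    exact step_keep d (digs_lt n d hd)

theorem digit_to_letter_eq (value : Int) : digit_to_letter value = digit_to_letter_alt value := by
  unfold digit_to_letter digit_to_letter_alt
  by_cases h0 : value.natAbs = 0
  · have : value = 0 := by omega
    subst this; decide
  · have habs : |value| = (value.natAbs : Int) := Int.abs_eq_natAbs value
    have hchars : (PySem.Int.toStr |value|).toList = Nat.toDigits 10 value.natAbs := by
      rw [habs, PySem.Int.toList_toStr]
      unfold PySem.Int.toChars
      rw [if_neg (by omega), Int.toNat_natCast]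
    simp only [hchars, if_neg h0, pipeline_eq value.natAbs (Nat.pos_of_ne_zero h0)]

-- ===== VERDICT (by name: the statement is the Claim_ definition above) =====
theorem digit_to_letter_spec : Claim_equal_digit_to_letter := by
  intro value _
  unfold Spec_digit_to_letter
  exact digit_to_letter_eq value
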